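-- pv_equiv track=rewrite | github.com/miliar/Code_Jam_Webscraper | solutions_python/Problem_178/2558.py | move_pancake
-- ===== SOURCE A (Python) =====
-- def move_pancake(data):
--     new_data = data.split('+')
--     st, ce =1, 2
--     count = len([i for i in new_data if i])
--     if new_data[0]:
--         return st + (ce * (count - 1))
--     else:
--         return ce * count
-- ===== SOURCE B (Python) =====
-- def move_pancake(data):
--     count = 0
--     in_run = False
--     for ch in data:
--         if ch == '+':
--             in_run = False
--         elif not in_run:
--             count += 1
--             in_run = True
--     first_nonplus = bool(data) and data[0] != '+'
--     return 2 * count - (1 if first_nonplus else 0)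
-- ===== Notes on version B (the rewrite author's own statement) =====
-- stated objective: alternative
-- what changed: Replaces split('+') + list-comprehension count + two-case branch by a single character scan maintaining a run flag, with the branch folded into the closed form 2*count - (1 if first char is non-'+' else 0).
import Mathlib
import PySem

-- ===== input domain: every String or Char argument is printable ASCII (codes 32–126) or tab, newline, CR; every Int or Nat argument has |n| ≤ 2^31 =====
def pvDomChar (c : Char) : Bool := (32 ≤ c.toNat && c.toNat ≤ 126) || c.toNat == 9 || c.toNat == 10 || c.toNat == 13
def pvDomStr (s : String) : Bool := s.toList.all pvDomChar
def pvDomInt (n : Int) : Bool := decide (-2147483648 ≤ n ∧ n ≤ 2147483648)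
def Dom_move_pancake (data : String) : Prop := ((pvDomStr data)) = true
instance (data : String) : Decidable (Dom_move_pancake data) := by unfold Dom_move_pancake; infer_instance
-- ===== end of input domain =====

-- B replaces split('+')+filter-count+branch by one character scan with a run flag and a branch-free closed form; same behaviour, similar cost.

-- ===== PORT A =====
-- data.split('+') : sep is the non-empty literal "+", so Python never raises; split never
-- returns an empty list, so new_data[0] is safe and is the head of the result (headD []).
def move_pancake (data : String) : Int :=
  let new_data := PySem.Chars.splitOn data.toList ['+']
  let st : Int := 1
  let ce : Int := 2
  let count : Int := ((new_data.filter (fun i => !i.isEmpty)).length : Int)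
  if !(new_data.headD []).isEmpty then st + ce * (count - 1) else ce * count

-- ===== PORT B =====
def move_pancake_alt (data : String) : Int :=
  let s := data.toList.foldl
    (fun (s : Int × Bool) (ch : Char) =>
      if ch = '+' then (s.1, false)
      else if !s.2 then (s.1 + 1, true) else s)
    ((0 : Int), false)
  let firstNonPlus : Bool := match data.toList with
    | [] => false
    | c :: _ => c ≠ '+'
  2 * s.1 - (if firstNonPlus then 1 else 0)

-- ===== PRECONDITION & SPEC =====
def Spec_move_pancake (data : String) (out : Int) : Prop := out = move_pancake_alt data
instance (data : String) (out : Int) : Decidable (Spec_move_pancake data out) := by unfold Spec_move_pancake; infer_instance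

-- ===== CLAIM (what is proved, stated in full; the proofs are below) =====
def Claim_equal_move_pancake : Prop := ∀ (data : String), Dom_move_pancake data → Spec_move_pancake data (move_pancake data)

-- ===== LEMMAS AND PROOFS =====

/-- Structural specification of Python split on the single separator '+'. -/
def splitP : List Char → List (List Char)
  | [] => [[]]
  | c :: rest => if c = '+' then [] :: splitP rest else (splitP rest).modifyHead (c :: ·)

theorem splitP_ne_nil (l : List Char) : splitP l ≠ [] := by
  cases l with
  | nil => simp [splitP]
  | cons c rest =>
    simp only [splitP]
    split_ifs
    · simp
    · intro h
      have := splitP_ne_nil rest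
      cases hr : splitP rest with
      | nil => exact this hr
      | cons a t => rw [hr] at h; simp [List.modifyHead] at h

theorem go_eq (fuel : ℕ) : ∀ (l cur : List Char) (acc : List (List Char)),
    l.length ≤ fuel →
    PySem.Chars.splitOn.go ['+'] fuel l cur acc
      = acc.reverse ++ (splitP l).modifyHead (cur.reverse ++ ·) := by
  induction fuel with
  | zero =>
    intro l cur acc h
    have : l = [] := List.length_eq_zero_iff.mp (Nat.le_zero.mp h)
    subst this
    simp [PySem.Chars.splitOn.go, splitP, List.modifyHead]
  | succ fuel ih =>
    intro l cur acc h
    cases l with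
    | nil => simp [PySem.Chars.splitOn.go, splitP, List.modifyHead]
    | cons c rest =>
      by_cases hc : c = '+'
      · subst hc
        rw [show PySem.Chars.splitOn.go ['+'] (fuel+1) ('+' :: rest) cur acc
              = PySem.Chars.splitOn.go ['+'] fuel rest [] (cur.reverse :: acc) by
            simp [PySem.Chars.splitOn.go, List.isPrefixOf]]
        rw [ih rest [] (cur.reverse :: acc) (by simpa using Nat.le_of_succ_le_succ h)]
        cases hr : splitP rest <;> simp [splitP, List.modifyHead, hr]
      · rw [show PySem.Chars.splitOn.go ['+'] (fuel+1) (c :: rest) cur acc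
              = PySem.Chars.splitOn.go ['+'] fuel rest (c :: cur) acc by
            simp only [PySem.Chars.splitOn.go, List.isPrefixOf,
              Bool.and_true, beq_iff_eq]
            rw [if_neg (by simpa using fun h => hc h.symm)]]
        rw [ih rest (c :: cur) acc (by simpa using Nat.le_of_succ_le_succ h)]
        simp only [splitP, if_neg hc]
        cases hr : splitP rest with
        | nil => exact absurd hr (splitP_ne_nil rest)
        | cons a t => simp [List.modifyHead]

theorem splitOn_eq_splitP (l : List Char) :
    PySem.Chars.splitOn l ['+'] = splitP l := by
  have h := go_eq (l.length + 1) l [] [] (by omega)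
  rw [PySem.Chars.splitOn, h]
  cases hr : splitP l with
  | nil => exact absurd hr (splitP_ne_nil l)
  | cons a t => simp [List.modifyHead]

/-- Run count as B's scan computes it, from the left: `b` is the in_run flag. -/
def runs : Bool → List Char → ℕ
  | _, [] => 0
  | b, c :: rest =>
    if c = '+' then runs false rest
    else if b then runs true rest else 1 + runs true rest

/-- Number of non-empty segments of `splitP l`. -/
def segCount (l : List Char) : ℕ := ((splitP l).filter (fun i => !i.isEmpty)).length

/-- 1 if the first segment of `splitP l` is non-empty, else 0. -/
def headFull (l : List Char) : ℕ := if ((splitP l).headD []).isEmpty then 0 else 1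

theorem segCount_runs (l : List Char) :
    segCount l = runs false l ∧ segCount l = runs true l + headFull l := by
  induction l with
  | nil => simp [segCount, headFull, runs, splitP]
  | cons c rest ih =>
    obtain ⟨ih1, ih2⟩ := ih
    by_cases hc : c = '+'
    · subst hc
      constructor
      · simpa [segCount, splitP, runs] using ih1
      · simpa [segCount, headFull, splitP, runs] using ih1
    · cases hr : splitP rest with
      | nil => exact absurd hr (splitP_ne_nil rest)
      | cons a t =>
        have hF : segCount (c :: rest) = 1 + (t.filter (fun i => !i.isEmpty)).length := by
          simp [segCount, splitP, hc, hr, List.modifyHead]; omega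
        have hFr : segCount rest = (if a.isEmpty then 0 else 1) + (t.filter (fun i => !i.isEmpty)).length := by
          by_cases ha : a.isEmpty <;> simp [segCount, hr, ha] <;> omega
        have hHr : headFull rest = if a.isEmpty then 0 else 1 := by
          simp [headFull, hr]
        have hH : headFull (c :: rest) = 1 := by
          simp [headFull, splitP, hc, hr, List.modifyHead]
        have hrs : runs false (c :: rest) = 1 + runs true rest := by simp [runs, hc]
        have hrs2 : runs true (c :: rest) = runs true rest := by simp [runs, hc]
        constructor
        · rw [hrs]; omega
        · rw [hrs2, hH]; omega

theorem foldl_step (l : List Char) : ∀ (k : Int) (b : Bool),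
    (l.foldl
      (fun (s : Int × Bool) (ch : Char) =>
        if ch = '+' then (s.1, false)
        else if !s.2 then (s.1 + 1, true) else s)
      (k, b)).1 = k + (runs b l : Int) := by
  induction l with
  | nil => intro k b; simp [runs]
  | cons c rest ih =>
    intro k b
    rw [List.foldl_cons]
    by_cases hc : c = '+'
    · rw [if_pos hc, ih k false]
      simp [runs, hc]
    · rw [if_neg hc]
      cases b with
      | false =>
        rw [show (!false) = true from rfl, if_pos rfl, ih (k + 1) true]
        simp only [runs, if_neg hc, if_neg (Bool.false_ne_true)]
        push_cast; ring
      | true =>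
        rw [show (!true) = false from rfl, if_neg (Bool.false_ne_true), ih k true]
        simp [runs, hc]

-- ===== VERDICT (by name: the statement is the Claim_ definition above) =====
theorem move_pancake_spec : Claim_equal_move_pancake := by
  intro data _
  simp only [Spec_move_pancake, move_pancake, move_pancake_alt]
  rw [splitOn_eq_splitP]
  have hfold := foldl_step data.toList 0 false
  have hcast : (((splitP data.toList).filter (fun i => !i.isEmpty)).length : Int)
      = (runs false data.toList : Int) := by
    exact_mod_cast (segCount_runs data.toList).1
  cases hl : data.toList with
  | nil => simp [splitP]
  | cons c rest =>
    rw [hl] at hfold hcast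
    by_cases hc : c = '+'
    · subst hc
      have hhead : ((splitP ('+' :: rest)).headD []).isEmpty = true := by simp [splitP]
      rw [hfold, hcast, hhead]
      simp [runs]
    · have hhead : ((splitP (c :: rest)).headD []).isEmpty = false := by
        cases hr : splitP rest with
        | nil => exact absurd hr (splitP_ne_nil rest)
        | cons a t => simp [splitP, hc, hr, List.modifyHead]
      have hpos : 1 ≤ runs false (c :: rest) := by simp [runs, hc]
      rw [hfold, hcast, hhead]
      simp [hc]
      omega
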